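-- pv_equiv track=rewrite | github.com/DrDonut326/AdventofCode | 2016/Day 7.py | split_hypernets
-- ===== SOURCE A (Python) =====
-- def split_hypernets(s):
--     """Returns a list of chunks of non and hyper strings"""
--     non = []
--     hyper = []
--     non_write = True
--     chunk = ''
--     for x in s:
--         if x == '[' or x == ']':
--             if len(chunk) > 0:
--                 if non_write:
--                     non.append(chunk)
--                 else:
--                     hyper.append(chunk)
--             non_write = not non_write
--             chunk = ''
--         else:
--             chunk += x
--     if len(chunk) > 0:
--         if non_write:
--             non.append(chunk)
--         else:
--             hyper.append(chunk)
--     return non, hyper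
-- ===== SOURCE B (Python) =====
-- def split_hypernets(s):
--     """Returns a list of chunks of non and hyper strings"""
--     parts = _bracket_chunks(s)
--     non = [p for i, p in enumerate(parts) if i % 2 == 0 and p]
--     hyper = [p for i, p in enumerate(parts) if i % 2 == 1 and p]
--     return non, hyper
--
--
-- def _bracket_chunks(t):
--     """Cut t at every '[' or ']' into the list of all chunks (empties kept)."""
--     parts = []
--     chunk = ''
--     for c in t:
--         if c == '[' or c == ']':
--             parts.append(chunk)
--             chunk = ''
--         else:
--             chunk += c
--     parts.append(chunk)
--     return parts
-- ===== Notes on version B (the rewrite author's own statement) =====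
-- stated objective: alternative
-- what changed: B replaces A's toggling parser (two output lists, a non_write flag and inline empty-filtering) by first cutting the string into the plain list of all bracket-delimited chunks and then partitioning that list by index parity with comprehensions that drop empty chunks.
import Mathlib
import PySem

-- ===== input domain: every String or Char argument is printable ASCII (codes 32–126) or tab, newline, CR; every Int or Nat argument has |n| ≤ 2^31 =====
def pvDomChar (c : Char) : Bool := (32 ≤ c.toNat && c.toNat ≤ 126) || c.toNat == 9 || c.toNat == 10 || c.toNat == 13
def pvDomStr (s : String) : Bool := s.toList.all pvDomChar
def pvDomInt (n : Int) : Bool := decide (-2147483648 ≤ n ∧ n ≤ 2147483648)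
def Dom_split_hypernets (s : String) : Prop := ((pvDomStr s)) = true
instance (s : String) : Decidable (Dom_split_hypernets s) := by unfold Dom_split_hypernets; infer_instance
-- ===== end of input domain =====

-- B cuts the string into the neutral list of all bracket-delimited chunks and then
-- partitions it by index parity (objective: alternative decomposition, same cost).

-- ===== PORT A =====
-- the duplicated 'if len(chunk) > 0: append to non or hyper' block of A, as a helper
def pvFlushA (non hyper : List (List Char)) (nw : Bool) (chunk : List Char) :
    List (List Char) × List (List Char) :=
  if chunk.length > 0 then
    if nw then (non ++ [chunk], hyper) else (non, hyper ++ [chunk])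
  else (non, hyper)

-- one iteration of A's for-loop; state = (non, hyper, non_write, chunk)
def pvStepA (st : List (List Char) × List (List Char) × Bool × List Char) (x : Char) :
    List (List Char) × List (List Char) × Bool × List Char :=
  if x = '[' ∨ x = ']' then
    let f := pvFlushA st.1 st.2.1 st.2.2.1 st.2.2.2
    (f.1, f.2, !st.2.2.1, ([] : List Char))
  else (st.1, st.2.1, st.2.2.1, st.2.2.2 ++ [x])

-- chunks handled as List Char, turned into String at the very end (exact: '+=' on str = List append)
def split_hypernets (s : String) : List String × List String :=
  let st := s.toList.foldl pvStepA ([], [], true, [])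
  let f := pvFlushA st.1 st.2.1 st.2.2.1 st.2.2.2
  (f.1.map String.ofList, f.2.map String.ofList)

-- ===== PORT B =====
-- Source B's _bracket_chunks: one pass collecting every chunk (empties kept); state = (parts, chunk)
def pvBracketChunks (t : List Char) : List (List Char) :=
  let st := t.foldl
    (fun (st : List (List Char) × List Char) c =>
      if c = '[' ∨ c = ']' then (st.1 ++ [st.2], ([] : List Char)) else (st.1, st.2 ++ [c]))
    ([], [])
  st.1 ++ [st.2]

-- the two comprehensions over enumerate(parts): keep q.2 when the index parity fits and q.2 is non-empty
def split_hypernets_alt (s : String) : List String × List String :=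
  let parts := pvBracketChunks s.toList
  let non := (PySem.List.enumerate parts 0).filterMap
    (fun q => if PySem.Int.mod q.1 2 = 0 ∧ q.2 ≠ [] then some q.2 else none)
  let hyper := (PySem.List.enumerate parts 0).filterMap
    (fun q => if PySem.Int.mod q.1 2 = 1 ∧ q.2 ≠ [] then some q.2 else none)
  (non.map String.ofList, hyper.map String.ofList)

-- ===== PRECONDITION & SPEC =====
def Spec_split_hypernets (s : String) (out : List String × List String) : Prop := out = split_hypernets_alt s
instance (s : String) (out : List String × List String) : Decidable (Spec_split_hypernets s out) := by unfold Spec_split_hypernets; infer_instance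

-- ===== CLAIM (what is proved, stated in full; the proofs are below) =====
def Claim_equal_split_hypernets : Prop := ∀ (s : String), Dom_split_hypernets s → Spec_split_hypernets s (split_hypernets s)

-- ===== LEMMAS AND PROOFS =====

-- proof-only: the bracket chunks of a char list, structurally
def pvChunksS : List Char → List (List Char)
  | [] => [[]]
  | c :: t =>
    if c = '[' ∨ c = ']' then [] :: pvChunksS t
    else
      match pvChunksS t with
      | p :: ps => (c :: p) :: ps
      | [] => [[]]

-- proof-only: route a chunk list into (non, hyper) starting with flag nw, dropping empties
def pvCollect : Bool → List (List Char) → List (List Char) × List (List Char)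
  | _, [] => ([], [])
  | nw, p :: ps =>
    let r := pvCollect (!nw) ps
    if p = [] then r
    else if nw then (p :: r.1, r.2) else (r.1, p :: r.2)

lemma pvChunksS_ne_nil (cs : List Char) : pvChunksS cs ≠ [] := by
  cases cs with
  | nil => simp [pvChunksS]
  | cons c t =>
    simp only [pvChunksS]
    split
    · simp
    · cases pvChunksS t <;> simp

lemma pvA_loop (cs : List Char) :
    ∀ (non hyper : List (List Char)) (nw : Bool) (chunk : List Char),
    pvFlushA (cs.foldl pvStepA (non, hyper, nw, chunk)).1
        (cs.foldl pvStepA (non, hyper, nw, chunk)).2.1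
        (cs.foldl pvStepA (non, hyper, nw, chunk)).2.2.1
        (cs.foldl pvStepA (non, hyper, nw, chunk)).2.2.2
      = (non ++ (pvCollect nw ((chunk ++ (pvChunksS cs).headI) :: (pvChunksS cs).tail)).1,
         hyper ++ (pvCollect nw ((chunk ++ (pvChunksS cs).headI) :: (pvChunksS cs).tail)).2) := by
  induction cs with
  | nil =>
    intro non hyper nw chunk
    simp only [List.foldl_nil, pvChunksS, List.headI, List.tail, List.append_nil]
    by_cases h : chunk = []
    · subst h; simp [pvFlushA, pvCollect]
    · cases nw <;>
        simp [pvFlushA, pvCollect, h, List.length_pos_iff.mpr h]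
  | cons c t ih =>
    intro non hyper nw chunk
    by_cases hc : c = '[' ∨ c = ']'
    · simp only [List.foldl_cons, pvStepA, hc, if_true]
      rw [ih]
      have hne := pvChunksS_ne_nil t
      obtain ⟨p, ps, hp⟩ : ∃ p ps, pvChunksS t = p :: ps := by
        cases h : pvChunksS t with
        | nil => exact absurd h hne
        | cons a b => exact ⟨a, b, rfl⟩
      simp only [pvChunksS, hc, if_true, hp, List.headI, List.tail, List.nil_append]
      by_cases h : chunk = []
      · subst h
        simp [pvFlushA, pvCollect]
      · cases nw <;>
          simp [pvFlushA, pvCollect, h, List.length_pos_iff.mpr h, List.append_assoc]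
    · simp only [List.foldl_cons, pvStepA, hc, if_false]
      rw [ih]
      have hne := pvChunksS_ne_nil t
      obtain ⟨p, ps, hp⟩ : ∃ p ps, pvChunksS t = p :: ps := by
        cases h : pvChunksS t with
        | nil => exact absurd h hne
        | cons a b => exact ⟨a, b, rfl⟩
      simp only [pvChunksS, hc, if_false, hp, List.headI, List.tail, List.append_assoc,
        List.singleton_append]

lemma pvB_loop (cs : List Char) :
    ∀ (parts : List (List Char)) (chunk : List Char),
    (cs.foldl
          (fun (st : List (List Char) × List Char) c =>
            if c = '[' ∨ c = ']' then (st.1 ++ [st.2], ([] : List Char)) else (st.1, st.2 ++ [c]))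
          (parts, chunk)).1
      ++ [(cs.foldl
          (fun (st : List (List Char) × List Char) c =>
            if c = '[' ∨ c = ']' then (st.1 ++ [st.2], ([] : List Char)) else (st.1, st.2 ++ [c]))
          (parts, chunk)).2]
      = parts ++ (chunk ++ (pvChunksS cs).headI) :: (pvChunksS cs).tail := by
  induction cs with
  | nil =>
    intro parts chunk
    simp [pvChunksS]
  | cons c t ih =>
    intro parts chunk
    have hne := pvChunksS_ne_nil t
    obtain ⟨p, ps, hp⟩ : ∃ p ps, pvChunksS t = p :: ps := by
      cases h : pvChunksS t with
      | nil => exact absurd h hne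
      | cons a b => exact ⟨a, b, rfl⟩
    by_cases hc : c = '[' ∨ c = ']'
    · simp only [List.foldl_cons, hc, if_true]
      rw [ih]
      simp [pvChunksS, hc, hp, List.append_assoc]
    · simp only [List.foldl_cons, hc, if_false]
      rw [ih]
      simp [pvChunksS, hc, hp, List.append_assoc]

lemma pvSel (ps : List (List Char)) :
    ∀ i : Int,
    (PySem.List.enumerate ps i).filterMap
        (fun q => if PySem.Int.mod q.1 2 = 0 ∧ q.2 ≠ [] then some q.2 else none)
      = (pvCollect (decide (i % 2 = 0)) ps).1
    ∧ (PySem.List.enumerate ps i).filterMap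
        (fun q => if PySem.Int.mod q.1 2 = 1 ∧ q.2 ≠ [] then some q.2 else none)
      = (pvCollect (decide (i % 2 = 0)) ps).2 := by
  induction ps with
  | nil => intro i; simp [PySem.List.enumerate_nil, pvCollect]
  | cons p ps ih =>
    intro i
    have hmod : PySem.Int.mod i 2 = i % 2 := PySem.Int.mod_eq_emod_of_pos (by norm_num)
    have hflip : decide ((i + 1) % 2 = 0) = !decide (i % 2 = 0) := by
      by_cases h : i % 2 = 0
      · have : (i + 1) % 2 = 1 := by omega
        simp [h, this]
      · have : (i + 1) % 2 = 0 := by omega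
        simp [h, this]
    obtain ⟨ihe, iho⟩ := ih (i + 1)
    rw [PySem.List.enumerate_cons]
    by_cases hp : p = []
    · subst hp
      simp only [List.filterMap_cons]
      constructor
      · simp only [ne_eq, not_true_eq_false, and_false, if_false, ihe, hflip, pvCollect]
        simp
      · simp only [ne_eq, not_true_eq_false, and_false, if_false, iho, hflip, pvCollect]
        simp
    · by_cases h : i % 2 = 0
      · have h1 : ¬ (i % 2 = 1) := by omega
        simp only [List.filterMap_cons, hmod, h, ne_eq, hp, not_false_eq_true, and_true,
          if_true, if_false, ihe, iho, hflip, pvCollect]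
        simp
      · have h1 : i % 2 = 1 := by omega
        simp only [List.filterMap_cons, hmod, h1, ne_eq, hp, not_false_eq_true, and_true,
          if_false, ihe, iho, hflip, pvCollect]
        simp

-- ===== VERDICT (by name: the statement is the Claim_ definition above) =====
theorem split_hypernets_spec : Claim_equal_split_hypernets := by
  intro s _
  unfold Spec_split_hypernets split_hypernets split_hypernets_alt pvBracketChunks
  have hA := pvA_loop s.toList [] [] true []
  have hB := pvB_loop s.toList [] []
  simp only [] at hA hB
  have hparts :
      pvChunksS s.toList
        = (([] : List Char) ++ (pvChunksS s.toList).headI) :: (pvChunksS s.toList).tail := by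
    obtain ⟨p, ps, hp⟩ : ∃ p ps, pvChunksS s.toList = p :: ps := by
      cases h : pvChunksS s.toList with
      | nil => exact absurd h (pvChunksS_ne_nil s.toList)
      | cons a b => exact ⟨a, b, rfl⟩
    simp [hp]
  obtain ⟨he, ho⟩ := pvSel (pvChunksS s.toList) 0
  simp only [hB, ← hparts] at *
  rw [hA]
  simp only [List.nil_append]
  rw [he, ho]
  norm_num
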